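-- pv_equiv track=rewrite | github.com/kr4g/Klotho | klotho/chronos/rhythm_trees/algorithms.py | auto_subdiv_matrix
-- ===== SOURCE A (Python) =====
-- def auto_subdiv(subdivs:tuple[int], n:int=1) -> tuple[tuple[int]]:
--     """
--     Automatically subdivide each element of S using a rotational scheme.
--
--     Each element in the subdivision tuple is expanded into a nested
--     ``(D, S)`` pair, where D is the original element and S is a uniform
--     tuple whose length is determined by a rotationally offset element.
--
--     Parameters
--     ----------
--     subdivs : tuple of int
--         The subdivision part (S) of a rhythm tree.
--     n : int, optional
--         The rotation offset used to select the subdivision count for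
--         each element. Default is 1.
--
--     Returns
--     -------
--     tuple of tuple
--         Nested ``(D, S)`` pairs for each element.
--     """
--     def _recurse(idx:int) -> tuple:
--         if idx == len(subdivs):
--             return ()
--         elt = subdivs[idx]
--         next_elt = (elt, (1,) * subdivs[(idx + n) % len(subdivs)])
--         return (next_elt,) + _recurse(idx + 1)
--     return _recurse(0)
--
-- def auto_subdiv_matrix(matrix, rotation_offset=1):
--     """
--     Apply :func:`auto_subdiv` to every element in a matrix of tree specs.
--
--     Each element of the matrix is a ``(D, S)`` pair. The function applies
--     ``auto_subdiv`` to each element's subdivisions with a rotation offset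
--     that varies with the element's row and column position.
--
--     Parameters
--     ----------
--     matrix : tuple of tuple
--         A matrix where each element is a ``(D, S)`` pair.
--     rotation_offset : int, optional
--         Base offset for rotation calculations. Default is 1.
--
--     Returns
--     -------
--     tuple of tuple
--         A new matrix with ``auto_subdiv`` applied to each element.
--     """
--     result = []
--     for i, row in enumerate(matrix):
--         new_row = []
--         for j, e in enumerate(row):
--             offset = rotation_offset * i
--             D, S = e[0], auto_subdiv(e[1], j - i + offset)
--             new_row.append((D, S))
--         result.append(tuple(new_row))
--     return tuple(result)
-- ===== SOURCE B (Python) =====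
-- def auto_subdiv(subdivs, n=1):
--     L = len(subdivs)
--     result = []
--     for idx in range(L):
--         result.append((subdivs[idx], (1,) * subdivs[(idx + n) % L]))
--     return tuple(result)
--
-- def auto_subdiv_matrix(matrix, rotation_offset=1):
--     return tuple(
--         tuple((D, auto_subdiv(S, j - i + rotation_offset * i))
--               for j, (D, S) in enumerate(row))
--         for i, row in enumerate(matrix)
--     )
-- ===== Notes on version B (the rewrite author's own statement) =====
-- stated objective: simpler
-- what changed: auto_subdiv's recursive helper with quadratic tuple concatenation is replaced by a single iterative accumulator loop over range(len), and the matrix driver's explicit append loops by nested comprehensions.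
import Mathlib
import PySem

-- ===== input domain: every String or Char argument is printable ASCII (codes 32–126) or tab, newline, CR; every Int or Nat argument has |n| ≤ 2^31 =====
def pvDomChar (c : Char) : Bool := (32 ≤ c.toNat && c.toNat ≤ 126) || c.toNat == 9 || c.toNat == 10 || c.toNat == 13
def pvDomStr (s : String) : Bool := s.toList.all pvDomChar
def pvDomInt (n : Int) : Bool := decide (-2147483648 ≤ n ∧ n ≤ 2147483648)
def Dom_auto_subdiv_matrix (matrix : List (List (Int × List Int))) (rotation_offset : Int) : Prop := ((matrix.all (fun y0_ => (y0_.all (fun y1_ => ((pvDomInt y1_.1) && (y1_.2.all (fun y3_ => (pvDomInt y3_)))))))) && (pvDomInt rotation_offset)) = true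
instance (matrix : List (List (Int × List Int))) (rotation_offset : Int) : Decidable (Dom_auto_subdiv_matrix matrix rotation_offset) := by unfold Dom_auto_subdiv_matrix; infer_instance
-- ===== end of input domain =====

-- B replaces A's recursive helper with an iterative index loop over range(len) and the
-- explicit append-loops of the matrix driver with nested comprehensions (objective: simpler).


-- ===== PORT A =====
-- A's inner `_recurse(idx)`: structural fuel makes the recursion total (fuel = number of
-- remaining steps; the `idx == len` test is A's own base case).
def pvSubdivRecA (subdivs : List Int) (n : Int) (idx : Nat) : Nat → List (Int × List Int)
  | 0 => []
  | fuel + 1 =>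
    if idx = subdivs.length then []
    else
      let elt := PySem.List.pyGetD subdivs (idx : Int) 0
      let next_elt := (elt, List.replicate (PySem.List.pyGetD subdivs
          (PySem.Int.mod ((idx : Int) + n) (subdivs.length : Int)) 0).toNat (1 : Int))
      next_elt :: pvSubdivRecA subdivs n (idx + 1) fuel

def pvAutoSubdivA (subdivs : List Int) (n : Int) : List (Int × List Int) :=
  pvSubdivRecA subdivs n 0 subdivs.length

def auto_subdiv_matrix (matrix : List (List (Int × List Int))) (rotation_offset : Int) : List (List (Int × (List (Int × List Int)))) :=
  (PySem.List.enumerate matrix).foldl (fun result (iRow : Int × List (Int × List Int)) =>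
    let new_row := (PySem.List.enumerate iRow.2).foldl
      (fun new_row (jE : Int × (Int × List Int)) =>
        let offset := rotation_offset * iRow.1
        new_row ++ [(jE.2.1, pvAutoSubdivA jE.2.2 (jE.1 - iRow.1 + offset))]) []
    result ++ [new_row]) []

-- ===== PORT B =====
-- B's iterative auto_subdiv: one pass over range(L) with an accumulator.
def pvAutoSubdivB (subdivs : List Int) (n : Int) : List (Int × List Int) :=
  let L : Int := subdivs.length
  (PySem.List.pyRange 0 L 1).foldl (fun result idx =>
    result ++ [(PySem.List.pyGetD subdivs idx 0,
      List.replicate (PySem.List.pyGetD subdivs (PySem.Int.mod (idx + n) L) 0).toNat (1 : Int))]) []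

def auto_subdiv_matrix_alt (matrix : List (List (Int × List Int))) (rotation_offset : Int) : List (List (Int × (List (Int × List Int)))) :=
  (PySem.List.enumerate matrix).map (fun iRow =>
    (PySem.List.enumerate iRow.2).map (fun jE =>
      (jE.2.1, pvAutoSubdivB jE.2.2 (jE.1 - iRow.1 + rotation_offset * iRow.1))))

-- ===== PRECONDITION & SPEC =====
def Spec_auto_subdiv_matrix (matrix : List (List (Int × List Int))) (rotation_offset : Int) (out : List (List (Int × (List (Int × List Int))))) : Prop := out = auto_subdiv_matrix_alt matrix rotation_offset
instance (matrix : List (List (Int × List Int))) (rotation_offset : Int) (out : List (List (Int × (List (Int × List Int))))) : Decidable (Spec_auto_subdiv_matrix matrix rotation_offset out) := by unfold Spec_auto_subdiv_matrix; infer_instance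

-- ===== CLAIM (what is proved, stated in full; the proofs are below) =====
def Claim_equal_auto_subdiv_matrix : Prop := ∀ (matrix : List (List (Int × List Int))) (rotation_offset : Int), Dom_auto_subdiv_matrix matrix rotation_offset → Spec_auto_subdiv_matrix matrix rotation_offset (auto_subdiv_matrix matrix rotation_offset)

-- ===== LEMMAS AND PROOFS =====

-- the common element map both loops compute
def pvElt (subdivs : List Int) (n : Int) (k : Nat) : Int × List Int :=
  (PySem.List.pyGetD subdivs (k : Int) 0,
   List.replicate (PySem.List.pyGetD subdivs (PySem.Int.mod ((k : Int) + n) (subdivs.length : Int)) 0).toNat (1 : Int))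

theorem pvSubdivRecA_eq (subdivs : List Int) (n : Int) :
    ∀ (fuel idx : Nat), idx + fuel = subdivs.length →
      pvSubdivRecA subdivs n idx fuel =
        (List.range' idx fuel).map (pvElt subdivs n) := by
  intro fuel
  induction fuel with
  | zero => intro idx _; simp [pvSubdivRecA]
  | succ f ih =>
    intro idx h
    have hne : idx ≠ subdivs.length := by omega
    simp only [pvSubdivRecA, List.range'_succ, if_neg hne]
    rw [ih (idx + 1) (by omega)]
    rfl

theorem pvAutoSubdiv_eq (subdivs : List Int) (n : Int) :
    pvAutoSubdivA subdivs n = pvAutoSubdivB subdivs n := by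
  have hA := pvSubdivRecA_eq subdivs n subdivs.length 0 (by omega)
  unfold pvAutoSubdivA
  rw [hA]
  simp only [pvAutoSubdivB, PySem.List.pyRange_one, PySem.List.foldl_append_singleton_eq_map,
    List.nil_append, List.map_map, List.range_eq_range']
  apply List.map_congr_left
  intro k _
  simp [pvElt]

theorem auto_subdiv_matrix_eq (matrix : List (List (Int × List Int))) (rotation_offset : Int) :
    auto_subdiv_matrix matrix rotation_offset = auto_subdiv_matrix_alt matrix rotation_offset := by
  unfold auto_subdiv_matrix auto_subdiv_matrix_alt
  rw [PySem.List.foldl_append_singleton_eq_map]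
  simp only [List.nil_append]
  apply List.map_congr_left
  intro iRow _
  rw [PySem.List.foldl_append_singleton_eq_map]
  simp only [List.nil_append]
  apply List.map_congr_left
  intro jE _
  rw [pvAutoSubdiv_eq]

-- ===== VERDICT (by name: the statement is the Claim_ definition above) =====
theorem auto_subdiv_matrix_spec : Claim_equal_auto_subdiv_matrix := by
  intro matrix rotation_offset _
  unfold Spec_auto_subdiv_matrix
  exact auto_subdiv_matrix_eq matrix rotation_offset
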